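-- pv_equiv track=rewrite | github.com/ebanner/project_euler | Euler.py | odd_composites
-- ===== SOURCE A (Python) =====
-- def odd_composites(limit):
--     """Instead of returning a list of primes, this returns a list of composits"""
--     limit += 1
--     nums = list(range(limit))
--     # assume every number is prime
--     prime = [True]*limit
--     # 0 and 1 are not prime
--     prime[0],prime[1],prime[2] = False,False,True
--
--     for num in range(2,limit):
--         if not prime[num]:
--             continue
--         for n in range(num+num, limit, num):
--             prime[n] = False
--
--     actual_primes = [2]
--     odd_composites = []
--
--     for num in range(3,len(prime),2):
--         if not prime[num]:
--             odd_composites.append(num)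
--
--     return odd_composites
-- ===== SOURCE B (Python) =====
-- def odd_composites(limit):
--     """Return the odd composite numbers up to limit (per-candidate trial division, no sieve table)."""
--     def is_composite(n):
--         d = 3
--         while d * d <= n:
--             if n % d == 0:
--                 return True
--             d += 2
--         return False
--     return [n for n in range(3, limit + 1, 2) if is_composite(n)]
-- ===== Notes on version B (the rewrite author's own statement) =====
-- stated objective: alternative
-- what changed: Replaces the Eratosthenes sieve table (mark multiples of each prime, then scan odd indices) with direct per-candidate trial division by odd divisors up to sqrt(n); no boolean array is built.
import Mathlib
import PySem

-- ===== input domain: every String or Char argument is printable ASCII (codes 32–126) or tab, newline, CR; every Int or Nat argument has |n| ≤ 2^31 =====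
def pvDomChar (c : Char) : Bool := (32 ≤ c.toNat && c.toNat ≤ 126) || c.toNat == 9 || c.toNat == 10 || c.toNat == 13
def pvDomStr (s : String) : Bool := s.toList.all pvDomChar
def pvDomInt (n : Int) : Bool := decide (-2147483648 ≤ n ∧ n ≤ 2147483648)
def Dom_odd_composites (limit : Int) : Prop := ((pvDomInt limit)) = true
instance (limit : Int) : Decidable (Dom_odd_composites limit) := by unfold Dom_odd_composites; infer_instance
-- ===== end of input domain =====

-- B replaces A's Eratosthenes sieve table with per-candidate trial division by odd divisors
-- up to sqrt(n) (objective: alternative algorithm; not claimed faster).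


-- ===== PORT A =====
-- (A also builds `nums = list(range(limit))` and `actual_primes = [2]`, both unused; omitted.)
-- body of `for num in range(2, limit)`: `if not prime[num]: continue` then
-- `for n in range(num+num, limit, num): prime[n] = False`
def sieveBody (b : Int) : List Bool → Int → List Bool :=
  fun pr num =>
    if !(PySem.List.pyGetD pr num false) then pr
    else (PySem.List.pyRange (num + num) b num).foldl
           (fun p n => PySem.List.pySetD p n false) pr

-- prime = [True]*limit; prime[0],prime[1],prime[2] = False,False,True
def sieveInit (b : Int) : List Bool :=
  PySem.List.pySetD (PySem.List.pySetD (PySem.List.pySetD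
    (List.replicate b.toNat true) 0 false) 1 false) 2 true

-- for num in range(2, limit): …
def sieveRun (b : Int) : List Bool :=
  (PySem.List.pyRange 2 b 1).foldl (sieveBody b) (sieveInit b)

def odd_composites (limit : Int) : List Int :=
  let prime := sieveRun (limit + 1)
  (PySem.List.pyRange 3 (PySem.List.len prime) 2).foldl
    (fun acc num => if !(PySem.List.pyGetD prime num false) then acc ++ [num] else acc) []

-- ===== PORT B =====
-- is_composite's while loop; n and d are positive Python ints, so the Nat port is exact
def isCompositeAux (n : Nat) (d : Nat) : Bool :=
  if h : d * d ≤ n then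
    if n % d = 0 then true else isCompositeAux n (d + 2)
  else false
termination_by n + 1 - d
decreasing_by
  have hd : d ≤ n := by
    rcases Nat.eq_zero_or_pos d with h0 | h0
    · omega
    · exact le_trans (Nat.le_mul_of_pos_left d h0) h
  omega

def odd_composites_alt (limit : Int) : List Int :=
  (PySem.List.pyRange 3 (limit + 1) 2).filter (fun n => isCompositeAux n.toNat 3)

-- ===== PRECONDITION & SPEC =====
-- A raises IndexError for limit < 2 (it assigns prime[2] on a list of length < 3); excluded.
def Pre_odd_composites (limit : Int) : Prop := 2 ≤ limit
instance (limit : Int) : Decidable (Pre_odd_composites limit) := by unfold Pre_odd_composites; infer_instance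
def pvWitness_odd_composites : Int := 30

def Spec_odd_composites (limit : Int) (out : List Int) : Prop := out = odd_composites_alt limit
instance (limit : Int) (out : List Int) : Decidable (Spec_odd_composites limit out) := by unfold Spec_odd_composites; infer_instance

-- ===== CLAIM (what is proved, stated in full; the proofs are below) =====
def Claim_equal_odd_composites : Prop := ∀ (limit : Int), Dom_odd_composites limit → Pre_odd_composites limit → Spec_odd_composites limit (odd_composites limit)

-- ===== LEMMAS AND PROOFS =====

-- setting an element to the default value `false` commutes with getD
lemma getD_set_false (p : List Bool) (i k : Nat) :
    (p.set i false).getD k false = if i = k then false else p.getD k false := by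
  simp only [List.getD, List.getElem?_set]
  split_ifs with h1 h2 <;> simp_all

lemma length_foldl_setD (ns : List Int) (pr : List Bool) :
    (ns.foldl (fun p n => PySem.List.pySetD p n false) pr).length = pr.length := by
  induction ns generalizing pr with
  | nil => rfl
  | cons n ns ih => simp [List.foldl_cons, ih, PySem.List.length_pySetD]

lemma getD_foldl_setD (ns : List Int) (h : ∀ n ∈ ns, 0 ≤ n) (pr : List Bool) (k : Nat) :
    (ns.foldl (fun p n => PySem.List.pySetD p n false) pr).getD k false
      = if (k : Int) ∈ ns then false else pr.getD k false := by
  induction ns generalizing pr with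
  | nil => simp
  | cons n ns ih =>
    have hn : 0 ≤ n := h n (List.mem_cons_self ..)
    rw [List.foldl_cons, ih (fun x hx => h x (List.mem_cons_of_mem _ hx))]
    rw [PySem.List.pySetD_of_nonneg pr false hn, getD_set_false]
    have hiff : n.toNat = k ↔ (k : Int) = n := by omega
    by_cases hm : (k : Int) ∈ ns <;> by_cases he : (k : Int) = n <;>
      simp_all [List.mem_cons]

lemma length_foldl_sieveBody (b : Int) (l : List Int) (pr : List Bool) :
    (l.foldl (sieveBody b) pr).length = pr.length := by
  induction l generalizing pr with
  | nil => rfl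
  | cons n l ih =>
    rw [List.foldl_cons, ih]
    simp only [sieveBody]
    split
    · rfl
    · exact length_foldl_setD _ _

-- the sieve invariant: after the outer loop has processed 2,…,m-1, index k is still True
-- iff k is prime or its least prime factor has not been reached yet
def SieveInv (L : Nat) (m : Int) (pr : List Bool) : Prop :=
  pr.length = L ∧ ∀ k : Nat, 2 ≤ k → k < L →
    (pr.getD k false = true ↔ (Nat.Prime k ∨ m ≤ (k.minFac : Int)))

lemma two_le_minFac {k : Nat} (hk : 2 ≤ k) : 2 ≤ k.minFac :=
  (Nat.minFac_prime (by omega)).two_le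

lemma minFac_lt_of_not_prime {k : Nat} (hk : 2 ≤ k) (h : ¬ Nat.Prime k) : k.minFac < k := by
  have hle : k.minFac ≤ k := Nat.minFac_le (by omega)
  rcases lt_or_eq_of_le hle with h' | h'
  · exact h'
  · exact absurd (h' ▸ Nat.minFac_prime (by omega : k ≠ 1)) h

lemma two_mul_minFac_le_of_not_prime {k : Nat} (hk : 2 ≤ k) (h : ¬ Nat.Prime k) :
    2 * k.minFac ≤ k := by
  obtain ⟨c, hc⟩ := Nat.minFac_dvd k
  have hp := two_le_minFac hk
  have hlt := minFac_lt_of_not_prime hk h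
  have hc2 : 2 ≤ c := by
    rcases Nat.lt_or_ge c 2 with h' | h'
    · interval_cases c <;> omega
    · exact h'
  calc 2 * k.minFac ≤ k.minFac * c := by nlinarith
    _ = k := hc.symm

lemma sieveBody_inv (L : Nat) (m : Int) (pr : List Bool)
    (h2 : 2 ≤ m) (hm : m < (L : Int)) (h : SieveInv L m pr) :
    SieveInv L (m + 1) (sieveBody ((L : Nat) : Int) pr m) := by
  obtain ⟨hlen, hinv⟩ := h
  set M := m.toNat with hM
  have hmM : m = (M : Int) := by omega
  have hM2 : 2 ≤ M := by omega
  have hML : M < L := by omega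
  have hget : PySem.List.pyGetD pr m false = pr.getD M false := by
    rw [hmM, PySem.List.pyGetD_natCast]
  simp only [sieveBody, hget]
  by_cases hcur : pr.getD M false = true
  · -- prime[num] is True: num is prime, its multiples ≥ 2*num get marked
    have hMprime : Nat.Prime M := by
      rcases (hinv M hM2 hML).mp hcur with h' | h'
      · exact h'
      · have hMf : M.minFac = M := by
          have := Nat.minFac_le (show 0 < M by omega)
          omega
        exact hMf ▸ Nat.minFac_prime (by omega : M ≠ 1)
    rw [if_neg (show ¬((!pr.getD M false) = true) by rw [hcur]; decide)]
    have hnonneg : ∀ n ∈ PySem.List.pyRange (m + m) ((L : Nat) : Int) m, 0 ≤ n := by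
      intro n hn
      have := (PySem.List.mem_pyRange_iff_of_pos (by omega : (0:Int) < m) n).mp hn
      omega
    have hmem : ∀ k : Nat, ((k : Int) ∈ PySem.List.pyRange (m + m) ((L : Nat) : Int) m
        ↔ 2 * M ≤ k ∧ k < L ∧ M ∣ k) := by
      intro k
      rw [PySem.List.mem_pyRange_iff_of_pos (by omega : (0:Int) < m)]
      constructor
      · rintro ⟨ha, hb, c, hc⟩
        refine ⟨by omega, by omega, ?_⟩
        have hkc : (k : Int) = m * (c + 2) := by linear_combination hc
        have hc2 : 0 ≤ c + 2 := by nlinarith [hkc, h2, Int.natCast_nonneg k]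
        refine ⟨(c + 2).toNat, ?_⟩
        have hcast : ((M * (c + 2).toNat : Nat) : Int) = (k : Int) := by
          push_cast [Int.toNat_of_nonneg hc2]
          rw [← hmM]; linarith [hkc]
        exact_mod_cast hcast.symm
      · rintro ⟨ha, hb, c, hc⟩
        refine ⟨by omega, by omega, (c : Int) - 2, ?_⟩
        have hcast : (k : Int) = (M : Int) * (c : Int) := by exact_mod_cast congrArg (Nat.cast (R := Int)) hc
        rw [← hmM] at hcast
        linear_combination hcast
    constructor
    · rw [length_foldl_setD]; exact hlen
    · intro k hk2 hkL
      rw [getD_foldl_setD _ hnonneg]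
      simp only [hmem k]
      by_cases hkp : Nat.Prime k
      · -- primes are never marked
        have hnh : ¬ (2 * M ≤ k ∧ k < L ∧ M ∣ k) := by
          rintro ⟨ha, -, hd⟩
          have : M = k := (Nat.prime_dvd_prime_iff_eq hMprime hkp).mp hd
          omega
        rw [if_neg hnh, hinv k hk2 hkL]
        constructor
        · intro _; left; exact hkp
        · intro _; left; exact hkp
      · -- composite k: it gets marked now exactly when minFac k = num
        have hfl := minFac_lt_of_not_prime hk2 hkp
        have hf2 := two_le_minFac hk2
        have h2f := two_mul_minFac_le_of_not_prime hk2 hkp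
        split_ifs with hcond
        · constructor
          · intro h'; simp at h'
          · rintro (h' | h')
            · exact absurd h' hkp
            · exfalso
              obtain ⟨-, -, hd⟩ := hcond
              have hle : k.minFac ≤ M := Nat.minFac_le_of_dvd hM2 hd
              omega
        · rw [hinv k hk2 hkL]
          constructor
          · rintro (h' | h')
            · exact absurd h' hkp
            · right
              have hne : (k.minFac : Int) ≠ m := by
                intro he
                refine hcond ⟨by omega, hkL, ?_⟩
                have hMf : k.minFac = M := by omega
                exact hMf ▸ Nat.minFac_dvd k
              omega
          · rintro (h' | h')
            · exact absurd h' hkp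
            · right; omega
  · -- prime[num] is False: num is composite, the state is unchanged
    have hfalse : pr.getD M false = false := by
      revert hcur; cases pr.getD M false <;> simp
    have hMnp : ¬ Nat.Prime M := by
      intro hp
      exact hcur ((hinv M hM2 hML).mpr (Or.inl hp))
    rw [if_pos (show (!pr.getD M false) = true by rw [hfalse]; rfl)]
    refine ⟨hlen, fun k hk2 hkL => ?_⟩
    rw [hinv k hk2 hkL]
    have hne : (k.minFac : Int) ≠ m := by
      intro he
      have hMf : k.minFac = M := by omega
      exact hMnp (hMf ▸ Nat.minFac_prime (by omega : k ≠ 1))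
    constructor
    · rintro (h' | h')
      · left; exact h'
      · right; omega
    · rintro (h' | h')
      · left; exact h'
      · right; omega

lemma sieve_fold (L : Nat) : ∀ (d : Nat) (m : Int) (pr : List Bool),
    ((L : Int) - m).toNat = d → 2 ≤ m → m ≤ (L : Int) → SieveInv L m pr →
    SieveInv L (L : Int)
      ((PySem.List.pyRange m ((L : Nat) : Int) 1).foldl (sieveBody ((L : Nat) : Int)) pr) := by
  intro d
  induction d with
  | zero =>
    intro m pr hd h2 hle hinv
    have hm : m = (L : Int) := by omega
    rw [hm, PySem.List.pyRange_one_eq_nil (le_refl _)]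
    exact hm ▸ hinv
  | succ d ih =>
    intro m pr hd h2 hle hinv
    have hlt : m < (L : Int) := by omega
    rw [PySem.List.pyRange_one_cons hlt, List.foldl_cons]
    exact ih (m + 1) _ (by omega) (by omega) (by omega)
      (sieveBody_inv L m pr h2 hlt hinv)

lemma length_sieveInit (b : Int) : (sieveInit b).length = b.toNat := by
  unfold sieveInit
  rw [PySem.List.pySetD_of_nonneg (i := 2) _ true (by norm_num),
    PySem.List.pySetD_of_nonneg (i := 1) _ false (by norm_num),
    PySem.List.pySetD_of_nonneg (i := 0) _ false (by norm_num)]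
  simp

lemma sieveInit_inv (L : Nat) (hL : 3 ≤ L) : SieveInv L 2 (sieveInit ((L : Nat) : Int)) := by
  have hlen : (sieveInit ((L : Nat) : Int)).length = L := by rw [length_sieveInit]; omega
  refine ⟨hlen, fun k hk2 hkL => ?_⟩
  have hget : (sieveInit ((L : Nat) : Int)).getD k false = true := by
    unfold sieveInit
    rw [PySem.List.pySetD_of_nonneg (i := 2) _ true (by norm_num),
      PySem.List.pySetD_of_nonneg (i := 1) _ false (by norm_num),
      PySem.List.pySetD_of_nonneg (i := 0) _ false (by norm_num)]
    have e0 : (0:Int).toNat = 0 := rfl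
    have e1 : (1:Int).toNat = 1 := rfl
    have e2 : (2:Int).toNat = 2 := rfl
    have hlenr : (List.replicate (((L:Nat):Int)).toNat true).length = L := by simp
    rcases Nat.eq_or_lt_of_le hk2 with h2 | h3
    · rw [e0, e1, e2, List.getD_eq_getElem?_getD, ← h2, List.getElem?_set_self (by simp; omega)]
      rfl
    · rw [e0, e1, e2, List.getD_eq_getElem?_getD, List.getElem?_set_ne (by omega),
        List.getElem?_set_ne (by omega), List.getElem?_set_ne (by omega),
        List.getElem?_replicate]
      simp [hkL]
  rw [hget]
  have h2f : 2 ≤ k.minFac := two_le_minFac hk2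
  constructor
  · intro _
    by_cases hp : Nat.Prime k
    · exact Or.inl hp
    · right; exact_mod_cast h2f
  · intro _; rfl

-- the finished sieve: index k holds True exactly for the primes
lemma sieveRun_prime (limit : Int) (h2 : 2 ≤ limit) (k : Nat) (hk2 : 2 ≤ k)
    (hkL : k < (limit + 1).toNat) :
    ((sieveRun (limit + 1)).getD k false = true ↔ Nat.Prime k) := by
  set L := (limit + 1).toNat with hLdef
  have hL3 : 3 ≤ L := by omega
  have hcast : ((L : Nat) : Int) = limit + 1 := by omega
  have hrun : sieveRun (limit + 1) =
      (PySem.List.pyRange 2 ((L : Nat) : Int) 1).foldl (sieveBody ((L : Nat) : Int))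
        (sieveInit ((L : Nat) : Int)) := by
    unfold sieveRun; rw [← hcast]
  have hinv := sieve_fold L ((L : Int) - 2).toNat 2 (sieveInit ((L : Nat) : Int)) rfl (le_refl _)
      (by omega) (sieveInit_inv L hL3)
  rw [hrun, hinv.2 k hk2 hkL]
  constructor
  · rintro (h' | h')
    · exact h'
    · have := Nat.minFac_le (show 0 < k by omega)
      omega
  · exact Or.inl

lemma length_sieveRun (limit : Int) : (sieveRun (limit + 1)).length = (limit + 1).toNat := by
  unfold sieveRun
  rw [length_foldl_sieveBody, length_sieveInit]

-- trial division: isCompositeAux k d is true iff some divisor e ≥ d of k's parity class has e*e ≤ k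
lemma isCompositeAux_iff (k : Nat) : ∀ (d : Nat),
    isCompositeAux k d = true ↔ ∃ e, d ≤ e ∧ e % 2 = d % 2 ∧ e * e ≤ k ∧ k % e = 0 := by
  have H : ∀ (fuel : Nat) (d : Nat), k + 1 - d ≤ fuel →
      (isCompositeAux k d = true ↔ ∃ e, d ≤ e ∧ e % 2 = d % 2 ∧ e * e ≤ k ∧ k % e = 0) := by
    intro fuel
    induction fuel with
    | zero =>
      intro d hf
      rw [isCompositeAux]
      have hdk : k < d := by omega
      have hnd : ¬ (d * d ≤ k) := by nlinarith
      rw [dif_neg hnd]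
      constructor
      · intro h; simp at h
      · rintro ⟨e, hde, -, hee, -⟩; exfalso; nlinarith
    | succ fuel ih =>
      intro d hf
      rw [isCompositeAux]
      by_cases hdd : d * d ≤ k
      · rw [dif_pos hdd]
        by_cases hmod : k % d = 0
        · rw [if_pos hmod]
          constructor
          · intro _; exact ⟨d, le_refl _, rfl, hdd, hmod⟩
          · intro _; rfl
        · rw [if_neg hmod, ih (d + 2) (by omega)]
          constructor
          · rintro ⟨e, he, hpar, hee, hm⟩; exact ⟨e, by omega, by omega, hee, hm⟩
          · rintro ⟨e, he, hpar, hee, hm⟩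
            have hne : e ≠ d := fun hh => hmod (hh ▸ hm)
            exact ⟨e, by omega, by omega, hee, hm⟩
      · rw [dif_neg hdd]
        constructor
        · intro h; simp at h
        · rintro ⟨e, hde, -, hee, -⟩; exfalso; nlinarith
  intro d; exact H (k + 1 - d) d (le_refl _)

-- for odd k ≥ 3: trial division from 3 certifies compositeness
lemma isCompositeAux_prime (k : Nat) (h3 : 3 ≤ k) (hodd : k % 2 = 1) :
    (isCompositeAux k 3 = true ↔ ¬ Nat.Prime k) := by
  rw [isCompositeAux_iff]
  constructor
  · rintro ⟨e, he3, -, hee, hdvd⟩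
    intro hp
    have hek : e < k := by nlinarith
    have hdvd' : e ∣ k := Nat.dvd_of_mod_eq_zero hdvd
    have := (Nat.prime_def_lt.mp hp).2 e hek hdvd'
    omega
  · intro hnp
    have h0 : 0 < k := by omega
    have hf := Nat.minFac_prime (show k ≠ 1 by omega)
    have hdvd := Nat.minFac_dvd k
    have hno2 : ¬ (2 ∣ k.minFac) := by
      intro hh
      have : 2 ∣ k := hh.trans hdvd
      omega
    have hoddf : k.minFac % 2 = 1 := by omega
    have h3f : 3 ≤ k.minFac := by
      have := hf.two_le
      omega
    have hsq : k.minFac * k.minFac ≤ k := by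
      have := Nat.minFac_sq_le_self h0 hnp
      nlinarith [this]
    have hmod0 : k % k.minFac = 0 := by
      obtain ⟨c, hc⟩ := hdvd
      have hmr := Nat.mul_mod_right k.minFac c
      rw [← hc] at hmr
      exact hmr
    exact ⟨k.minFac, h3f, by omega, hsq, hmod0⟩

-- ===== VERDICT (by name: the statement is the Claim_ definition above) =====
theorem odd_composites_spec : Claim_equal_odd_composites := by
  intro limit hdom hpre
  unfold Spec_odd_composites
  have h2 : 2 ≤ limit := hpre
  simp only [odd_composites, odd_composites_alt]
  rw [PySem.List.foldl_append_if_eq_filter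
    (fun num => !(PySem.List.pyGetD (sieveRun (limit + 1)) num false))]
  rw [List.nil_append]
  have hlen : PySem.List.len (sieveRun (limit + 1)) = limit + 1 := by
    rw [PySem.List.len_eq, length_sieveRun]; omega
  rw [hlen]
  apply List.filter_congr
  intro num hmem
  obtain ⟨h3, hlt, hdvd⟩ := (PySem.List.mem_pyRange_iff_of_pos (by omega : (0:Int) < 2) num).mp hmem
  set N := num.toNat with hN
  have hnum : num = (N : Int) := by omega
  have hN3 : 3 ≤ N := by omega
  have hNL : N < (limit + 1).toNat := by omega
  have hNodd : N % 2 = 1 := by omega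
  rw [hnum, PySem.List.pyGetD_natCast]
  have hiff := sieveRun_prime limit h2 N (by omega) hNL
  have hciff := isCompositeAux_prime N hN3 hNodd
  show (!(sieveRun (limit + 1)).getD N false) = isCompositeAux ((N : Int)).toNat 3
  have hNback : ((N : Int)).toNat = N := by omega
  rw [hNback]
  by_cases hp : Nat.Prime N
  · rw [hiff.mpr hp]
    have hnc : isCompositeAux N 3 ≠ true := fun hc => (hciff.mp hc) hp
    simp [hnc]
  · have hft : (sieveRun (limit + 1)).getD N false = false := by
      cases hb : (sieveRun (limit + 1)).getD N false
      · rfl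
      · exact absurd (hiff.mp hb) hp
    rw [hft, hciff.mpr hp]
    rfl
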